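-- pv_equiv track=rewrite | github.com/seiya592/atcoder | 010_tessoku/3/B14/B14.py | calc
-- ===== SOURCE A (Python) =====
-- def has_bit(n, i) -> bool:
--     """
--     nで表現される集合に要素iが含まれているかを判定
--     :param int n: 集合
--     :param int i: 要素
--     :return:bool True→含まれている False→含まれていない
--     """
--     return (n & (1 << i)) > 0
--
-- def calc(L):
--     ALL = 2 ** len(L)
--     ans = []
--     for n in range(ALL):
--         total = 0
--         for i in range(len(L)):
--             if has_bit(n,i):
--                 total += L[i]
--         ans.append(total)
--     return ans
-- ===== SOURCE B (Python) =====
-- def calc(L):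
--     # doubling DP: after processing k elements, ans[n] is the sum of the
--     # subset of the first k elements encoded by the bits of n
--     ans = [0]
--     for x in L:
--         ans += [s + x for s in ans]
--     return ans
-- ===== Notes on version B (the rewrite author's own statement) =====
-- stated objective: faster
-- what changed: replaces the per-mask inner loop over all bit positions by a doubling DP that extends the answer list once per element, so each subset sum is produced in O(1) from an earlier one
import Mathlib
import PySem

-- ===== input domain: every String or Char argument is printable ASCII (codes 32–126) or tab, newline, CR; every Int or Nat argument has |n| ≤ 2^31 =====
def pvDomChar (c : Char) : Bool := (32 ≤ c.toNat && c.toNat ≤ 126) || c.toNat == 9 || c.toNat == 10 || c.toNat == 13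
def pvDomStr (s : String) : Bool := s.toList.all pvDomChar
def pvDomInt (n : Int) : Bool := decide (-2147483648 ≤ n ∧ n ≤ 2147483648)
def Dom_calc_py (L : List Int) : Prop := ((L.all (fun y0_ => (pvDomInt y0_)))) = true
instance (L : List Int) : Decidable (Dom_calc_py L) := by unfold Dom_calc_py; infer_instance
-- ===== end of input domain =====

-- B replaces A's per-mask inner loop over all bit positions by a doubling DP over the elements.

-- ===== PORT A =====
-- has_bit(n, i) = (n & (1 << i)) > 0; i is a loop index here, always ≥ 0,
-- where Python's `1 << i` is exactly `(1:Int) <<< i.toNat`.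
def hasBit (n i : Int) : Bool := decide (PySem.Int.band n ((1:Int) <<< i.toNat) > 0)

def calc_py (L : List Int) : List Int :=
  let ALL : Int := 2 ^ L.length
  (PySem.List.pyRange 0 ALL 1).foldl
    (fun ans n =>
      ans ++ [(PySem.List.pyRange 0 (L.length : Int) 1).foldl
        (fun total i => if hasBit n i then total + PySem.List.pyGetD L i 0 else total) 0])
    []

-- ===== PORT B =====
def calc_py_alt (L : List Int) : List Int :=
  L.foldl (fun ans x => ans ++ ans.map (fun s => s + x)) [0]

-- ===== PRECONDITION & SPEC =====
def Spec_calc_py (L : List Int) (out : List Int) : Prop := out = calc_py_alt L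
instance (L : List Int) (out : List Int) : Decidable (Spec_calc_py L out) := by unfold Spec_calc_py; infer_instance

-- ===== CLAIM (what is proved, stated in full; the proofs are below) =====
def Claim_equal_calc_py : Prop := ∀ (L : List Int), Dom_calc_py L → Spec_calc_py L (calc_py L)

-- ===== LEMMAS AND PROOFS =====

/-- The subset sum of `L` selected by the bits of `m` (bit `i` picks `L[i]`). -/
def pvSubSum : List Int → Nat → Int
  | [], _ => 0
  | a :: t, m => (if m % 2 = 1 then a else 0) + pvSubSum t (m / 2)

lemma pv_band_pow_ne_zero_iff (m j : Nat) : (m &&& (1 <<< j) ≠ 0) ↔ m.testBit j := by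
  rw [Nat.one_shiftLeft]
  constructor
  · intro h
    by_contra hb
    apply h
    apply Nat.eq_of_testBit_eq
    intro k
    simp only [Nat.testBit_and, Nat.testBit_two_pow, Nat.zero_testBit, Bool.and_eq_false_iff]
    by_cases hk : j = k
    · subst hk; left; simpa using hb
    · right; simp [hk]
  · intro h h0
    have := congrArg (fun x => x.testBit j) h0
    simp [Nat.testBit_and, h] at this

lemma pv_hasBit_natCast (m j : Nat) : hasBit (m : Int) (j : Int) = m.testBit j := by
  unfold hasBit
  have h1 : ((1:Int) <<< ((j : Int)).toNat) = ((1 <<< j : Nat) : Int) := by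
    simp [Int.shiftLeft_eq]
  rw [h1, PySem.Int.band_natCast]
  cases h : m.testBit j
  · have h0 : m &&& (1 <<< j) = 0 := by
      by_contra hc
      have hb := (pv_band_pow_ne_zero_iff m j).mp hc
      simp [h] at hb
    simp [h0]
  · have h0 : m &&& (1 <<< j) ≠ 0 := (pv_band_pow_ne_zero_iff m j).mpr (by simp [h])
    simp [Int.natCast_pos, Nat.pos_iff_ne_zero, h0]

lemma pv_innerA : ∀ (L : List Int) (m : Nat) (t : Int),
    (PySem.List.pyRange 0 (L.length : Int) 1).foldl
      (fun total i => if hasBit (m : Int) i then total + PySem.List.pyGetD L i 0 else total) t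
    = t + pvSubSum L m := by
  intro L
  induction L with
  | nil => intro m t; simp [pvSubSum]
  | cons a tl ih =>
    intro m t
    have hlen : ((a :: tl).length : Int) = ((tl.length + 1 : Nat) : Int) := by simp
    rw [hlen, PySem.List.pyRange_zero_nat, List.range_succ_eq_map, List.map_cons, List.map_map,
      List.foldl_cons, List.foldl_map]
    have hbit : ∀ k : Nat, m.testBit (k + 1) = (m / 2).testBit k := fun k => Nat.testBit_succ m k
    have hstep :
        (fun (total : Int) (k : Nat) =>
          if hasBit (m : Int) (((fun k : Nat => (k : Int)) ∘ Nat.succ) k) = true then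
            total + PySem.List.pyGetD (a :: tl) (((fun k : Nat => (k : Int)) ∘ Nat.succ) k) 0 else total)
        = (fun (total : Int) (k : Nat) =>
          if hasBit ((m / 2 : Nat) : Int) ((k : Nat) : Int) = true then
            total + PySem.List.pyGetD tl ((k : Nat) : Int) 0 else total) := by
      funext total k
      show (if hasBit (m : Int) ((k + 1 : Nat) : Int) = true then
          total + PySem.List.pyGetD (a :: tl) ((k + 1 : Nat) : Int) 0 else total) = _
      rw [pv_hasBit_natCast, pv_hasBit_natCast, hbit,
        PySem.List.pyGetD_natCast, PySem.List.pyGetD_natCast, List.getD_cons_succ]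
    rw [hstep]
    have hrec := ih (m / 2)
      (if hasBit (m : Int) ((0 : Nat) : Int) = true then t + PySem.List.pyGetD (a :: tl) ((0 : Nat) : Int) 0 else t)
    rw [PySem.List.pyRange_zero_nat, List.foldl_map] at hrec
    simp only [Int.natCast_zero] at hrec ⊢
    have h00 : hasBit (m : Int) (0 : Int) = decide (m % 2 = 1) :=
      (pv_hasBit_natCast m 0).trans (Nat.testBit_zero m)
    rw [hrec, h00]
    simp only [pvSubSum, PySem.List.pyGetD_zero_cons]
    by_cases hm : m % 2 = 1 <;> simp [hm] <;> try omega

lemma pv_calcA (L : List Int) :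
    calc_py L = (List.range (2 ^ L.length)).map (pvSubSum L) := by
  have hall : ((2:Int) ^ L.length) = ((2 ^ L.length : Nat) : Int) := by exact_mod_cast rfl
  simp only [calc_py]
  rw [hall, PySem.List.pyRange_zero_nat (2 ^ L.length), List.foldl_map,
    PySem.List.foldl_append_singleton_eq_map]
  simp only [List.nil_append]
  apply List.map_congr_left
  intro m _
  simpa using pv_innerA L m 0

lemma pv_S1 : ∀ (p : List Int) (x : Int) (m : Nat), m < 2 ^ p.length →
    pvSubSum (p ++ [x]) m = pvSubSum p m := by
  intro p
  induction p with
  | nil =>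
    intro x m hm
    have hm0 : m = 0 := by simpa using hm
    subst hm0
    simp [pvSubSum]
  | cons a p ih =>
    intro x m hm
    have h2 : 2 ^ (a :: p).length = 2 * 2 ^ p.length := by
      simp [List.length_cons, Nat.pow_succ]; omega
    simp only [List.cons_append, pvSubSum]
    rw [ih x (m / 2) (by omega)]

lemma pv_S2 : ∀ (p : List Int) (x : Int) (m : Nat), m < 2 ^ p.length →
    pvSubSum (p ++ [x]) (2 ^ p.length + m) = pvSubSum p m + x := by
  intro p
  induction p with
  | nil =>
    intro x m hm
    have hm0 : m = 0 := by simpa using hm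
    subst hm0
    simp [pvSubSum]
  | cons a p ih =>
    intro x m hm
    have h2 : 2 ^ (a :: p).length = 2 * 2 ^ p.length := by
      simp [List.length_cons, Nat.pow_succ]; omega
    simp only [List.cons_append, pvSubSum]
    have hmod : (2 ^ (a :: p).length + m) % 2 = m % 2 := by omega
    have hdiv : (2 ^ (a :: p).length + m) / 2 = 2 ^ p.length + m / 2 := by omega
    rw [hmod, hdiv, ih x (m / 2) (by omega)]
    omega

lemma pv_altgen : ∀ (L p : List Int),
    L.foldl (fun ans x => ans ++ ans.map (fun s => s + x))
      ((List.range (2 ^ p.length)).map (pvSubSum p))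
    = (List.range (2 ^ (p ++ L).length)).map (pvSubSum (p ++ L)) := by
  intro L
  induction L with
  | nil => intro p; simp
  | cons x L ih =>
    intro p
    have hstep :
        (List.range (2 ^ p.length)).map (pvSubSum p)
          ++ ((List.range (2 ^ p.length)).map (pvSubSum p)).map (fun s => s + x)
        = (List.range (2 ^ (p ++ [x]).length)).map (pvSubSum (p ++ [x])) := by
      have hlen : 2 ^ (p ++ [x]).length = 2 ^ p.length + 2 ^ p.length := by
        simp [Nat.pow_succ]; omega
      rw [hlen, List.range_add, List.map_append]
      congr 1
      · apply List.map_congr_left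
        intro m hm
        exact (pv_S1 p x m (List.mem_range.mp hm)).symm
      · rw [List.map_map, List.map_map]
        apply List.map_congr_left
        intro m hm
        show pvSubSum p m + x = pvSubSum (p ++ [x]) (2 ^ p.length + m)
        exact (pv_S2 p x m (List.mem_range.mp hm)).symm
    calc (x :: L).foldl (fun ans x => ans ++ ans.map (fun s => s + x))
          ((List.range (2 ^ p.length)).map (pvSubSum p))
        = L.foldl (fun ans x => ans ++ ans.map (fun s => s + x))
            ((List.range (2 ^ (p ++ [x]).length)).map (pvSubSum (p ++ [x]))) := by
          rw [List.foldl_cons, hstep]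
      _ = (List.range (2 ^ ((p ++ [x]) ++ L).length)).map (pvSubSum ((p ++ [x]) ++ L)) := ih (p ++ [x])
      _ = (List.range (2 ^ (p ++ (x :: L)).length)).map (pvSubSum (p ++ (x :: L))) := by
          rw [List.append_assoc, List.singleton_append]

lemma pv_calcB (L : List Int) :
    calc_py_alt L = (List.range (2 ^ L.length)).map (pvSubSum L) := by
  unfold calc_py_alt
  have h0 : ([0] : List Int) = (List.range (2 ^ ([] : List Int).length)).map (pvSubSum []) := by
    simp [pvSubSum]
  rw [h0, pv_altgen L []]
  rfl

-- ===== VERDICT (by name: the statement is the Claim_ definition above) =====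
theorem calc_py_spec : Claim_equal_calc_py := by
  intro L _
  unfold Spec_calc_py
  rw [pv_calcA, pv_calcB]
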